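-- pv_equiv track=rewrite | github.com/umilISLab/moreever | util.py | collect_tokens
-- ===== SOURCE A (Python) =====
-- from typing import Dict, List, Optional
-- import itertools
--
-- def collect_tokens(
--     tokenized: Dict[str, Dict[str, List[List[str]]]],
--     corpus: Optional[str] = None,
-- ) -> List[List[str]]:
--     """
--     >>> data = {'A': {'1': [['aa', 'bb'], ['cc']], '2':[['c', 'd']]}, 'B': {'I': [['a', 'b']], 'II': [['bd', 'ce', 'cf'], ['ff']]}}
--     >>> collect_tokens(data, 'A')
--     [['aa', 'bb'], ['cc'], ['c', 'd']]
--
--     >>> collect_tokens(data, 'B')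
--     [['a', 'b'], ['bd', 'ce', 'cf'], ['ff']]
--
--     >>> collect_tokens(data)
--     [['aa', 'bb'], ['cc'], ['c', 'd'], ['a', 'b'], ['bd', 'ce', 'cf'], ['ff']]
--
--
--     """
--     result = []
--     if corpus:
--         # result = list(tokenized[corpus].values())
--         result = list(itertools.chain(*list(tokenized[corpus].values())))
--     else:
--         for c in tokenized.keys():
--             result += collect_tokens(tokenized, c)
--     return result
-- ===== SOURCE B (Python) =====
-- def collect_tokens(tokenized, corpus=None):
--     # Iterative re-implementation: direct loops instead of recursion + itertools.chain.
--     result = []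
--     if corpus:
--         for toks in tokenized[corpus].values():
--             result.extend(toks)
--     else:
--         for sub in tokenized.values():
--             for toks in sub.values():
--                 result.extend(toks)
--     return result
-- ===== Notes on version B (the rewrite author's own statement) =====
-- stated objective: simpler
-- what changed: Replaces A's per-key recursion plus itertools.chain with direct iteration: one loop over the selected sub-dict's values, or a nested loop over all sub-dicts, extending a single result list.
-- outside the precondition, e.g. on collect_tokens({'': {'k': [['a']]}}, None): A raises RecursionError, B returns [['a']]
-- crash fix: When corpus is falsy (None or '') and tokenized contains an empty-string top-level key, A infinitely recurses (RecursionError) while B returns the full flattened list. — e.g. on collect_tokens([("", [("k", [["a"]])])], none): A raises RecursionError, B returns [["a"]]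
import Mathlib
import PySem

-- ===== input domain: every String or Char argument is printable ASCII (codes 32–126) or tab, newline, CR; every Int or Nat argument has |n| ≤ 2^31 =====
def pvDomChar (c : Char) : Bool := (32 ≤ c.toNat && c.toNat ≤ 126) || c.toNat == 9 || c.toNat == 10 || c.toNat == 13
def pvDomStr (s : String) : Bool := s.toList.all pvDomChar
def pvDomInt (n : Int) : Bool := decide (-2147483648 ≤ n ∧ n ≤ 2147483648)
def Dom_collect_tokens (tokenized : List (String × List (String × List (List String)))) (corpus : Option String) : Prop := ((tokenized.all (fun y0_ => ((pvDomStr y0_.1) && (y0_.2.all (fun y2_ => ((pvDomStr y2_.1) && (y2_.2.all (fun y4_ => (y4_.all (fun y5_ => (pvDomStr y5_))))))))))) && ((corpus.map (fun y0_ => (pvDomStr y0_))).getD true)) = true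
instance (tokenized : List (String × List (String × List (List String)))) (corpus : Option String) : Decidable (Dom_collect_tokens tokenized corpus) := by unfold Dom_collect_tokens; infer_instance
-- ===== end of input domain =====

-- B replaces A's per-key recursion + itertools.chain by direct (nested) iteration; objective: simpler.

-- shared helpers (Python semantics, used by both ports)
-- Python truthiness of the Optional[str] `corpus`: Some nonempty string
def pvTruthy (corpus : Option String) : Bool :=
  match corpus with
  | some s => s ≠ ""
  | none => false

-- tokenized[c]: dict subscript = first-match lookup; KeyError (key absent) is excluded by Pre_
def pvSub (tokenized : List (String × List (String × List (List String)))) (c : String) :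
    List (String × List (List String)) :=
  (tokenized.lookup c).getD []

-- ===== PORT A =====
-- A recurses with each top-level key; Python diverges (RecursionError) when a key is the empty
-- string and corpus is falsy — the fuel (2 suffices elsewhere) only makes the port total; those
-- inputs are excluded by Pre_.
def collect_tokensFuel (fuel : Nat) (tokenized : List (String × List (String × List (List String))))
    (corpus : Option String) : List (List String) :=
  match fuel with
  | 0 => []
  | fuel + 1 =>
    if pvTruthy corpus then
      -- list(itertools.chain(*list(tokenized[corpus].values())))
      ((pvSub tokenized (corpus.getD "")).map Prod.snd).flatten
    else
      -- for c in tokenized.keys(): result += collect_tokens(tokenized, c)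
      (tokenized.map Prod.fst).foldl
        (fun acc c => acc ++ collect_tokensFuel fuel tokenized (some c)) []

def collect_tokens (tokenized : List (String × List (String × List (List String))))
    (corpus : Option String) : List (List String) :=
  collect_tokensFuel 2 tokenized corpus

-- ===== PORT B =====
def collect_tokens_alt (tokenized : List (String × List (String × List (List String))))
    (corpus : Option String) : List (List String) :=
  if pvTruthy corpus then
    -- for toks in tokenized[corpus].values(): result.extend(toks)
    ((pvSub tokenized (corpus.getD "")).map Prod.snd).foldl (fun acc toks => acc ++ toks) []
  else
    -- for sub in tokenized.values(): for toks in sub.values(): result.extend(toks)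
    tokenized.foldl
      (fun acc p => (p.2.map Prod.snd).foldl (fun acc2 toks => acc2 ++ toks) acc) []

-- ===== PRECONDITION & SPEC =====
-- Pre_ excludes: (a) a truthy corpus absent from tokenized (A raises KeyError); (b) a falsy corpus
-- with an empty-string top-level key (A infinitely recurses, RecursionError); (c) duplicate
-- top-level keys, which cannot arise from a Python dict (artifact of the assoc-list encoding).
def Pre_collect_tokens (tokenized : List (String × List (String × List (List String))))
    (corpus : Option String) : Prop :=
  (tokenized.map Prod.fst).Nodup ∧
    (if pvTruthy corpus then corpus.getD "" ∈ tokenized.map Prod.fst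
     else "" ∉ tokenized.map Prod.fst)
instance (tokenized : List (String × List (String × List (List String)))) (corpus : Option String) : Decidable (Pre_collect_tokens tokenized corpus) := by unfold Pre_collect_tokens; infer_instance

def pvWitness_collect_tokens : (List (String × List (String × List (List String)))) × Option String :=
  ([("A", [("1", [["aa", "bb"], ["cc"]])]), ("B", [("I", [["a", "b"]])])], none)

-- When corpus is falsy (None or "") and tokenized has an empty-string top-level key, A infinitely
-- recurses (RecursionError) while B returns the full flattened list.
def Raises_collect_tokens (tokenized : List (String × List (String × List (List String))))
    (corpus : Option String) : Prop :=
  pvTruthy corpus = false ∧ "" ∈ tokenized.map Prod.fst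
instance (tokenized : List (String × List (String × List (List String)))) (corpus : Option String) : Decidable (Raises_collect_tokens tokenized corpus) := by unfold Raises_collect_tokens; infer_instance
def pvRaiseWitness_collect_tokens : (List (String × List (String × List (List String)))) × Option String :=
  ([("", [("k", [["a"]])])], none)
def pvRaiseWitnessOut_collect_tokens : List (List String) := [["a"]]

def Spec_collect_tokens (tokenized : List (String × List (String × List (List String)))) (corpus : Option String) (out : List (List String)) : Prop := out = collect_tokens_alt tokenized corpus
instance (tokenized : List (String × List (String × List (List String)))) (corpus : Option String) (out : List (List String)) : Decidable (Spec_collect_tokens tokenized corpus out) := by unfold Spec_collect_tokens; infer_instance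

-- ===== CLAIM (what is proved, stated in full; the proofs are below) =====
def Claim_equal_collect_tokens : Prop := ∀ (tokenized : List (String × List (String × List (List String)))) (corpus : Option String), Dom_collect_tokens tokenized corpus → Pre_collect_tokens tokenized corpus → Spec_collect_tokens tokenized corpus (collect_tokens tokenized corpus)

def Claim_raises_collect_tokens : Prop := (∀ (tokenized : List (String × List (String × List (List String)))) (corpus : Option String), Dom_collect_tokens tokenized corpus → Raises_collect_tokens tokenized corpus → ¬ Pre_collect_tokens tokenized corpus) ∧ (Dom_collect_tokens (pvRaiseWitness_collect_tokens.1) (pvRaiseWitness_collect_tokens.2) ∧ Raises_collect_tokens (pvRaiseWitness_collect_tokens.1) (pvRaiseWitness_collect_tokens.2) ∧ collect_tokens_alt (pvRaiseWitness_collect_tokens.1) (pvRaiseWitness_collect_tokens.2) = pvRaiseWitnessOut_collect_tokens)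

-- ===== LEMMAS AND PROOFS =====

-- with distinct top-level keys, looking each key back up returns its own sub-dict
theorem map_lookup_eq_map_snd {β : Type} (tokenized : List (String × β))
    (h : (tokenized.map Prod.fst).Nodup) (f : Option β → List (List String)) :
    (tokenized.map Prod.fst).map (fun c => f (tokenized.lookup c)) =
      tokenized.map (fun p => f (some p.2)) := by
  induction tokenized with
  | nil => simp
  | cons hd tl ih =>
    simp only [List.map_cons, List.nodup_cons] at h ⊢
    have h1 : (hd :: tl).lookup hd.1 = some hd.2 := by simp [List.lookup]
    rw [h1]
    congr 1
    have hmem : ∀ c ∈ tl.map Prod.fst, ((hd :: tl).lookup c) = tl.lookup c := by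
      intro c hc
      have hne : hd.1 ≠ c := fun e => h.1 (e ▸ hc)
      have hbeq : (c == hd.1) = false := beq_eq_false_iff_ne.mpr (Ne.symm hne)
      simp [List.lookup, hbeq]
    calc (tl.map Prod.fst).map (fun c => f ((hd :: tl).lookup c))
        = (tl.map Prod.fst).map (fun c => f (tl.lookup c)) :=
          List.map_congr_left (fun c hc => by rw [hmem c hc])
      _ = tl.map (fun p => f (some p.2)) := ih h.2

-- ===== VERDICT (by name: the statement is the Claim_ definition above) =====
theorem collect_tokens_spec : Claim_equal_collect_tokens := by
  intro tokenized corpus _ hpre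
  obtain ⟨hnd, hcase⟩ := hpre
  unfold Spec_collect_tokens collect_tokens collect_tokens_alt collect_tokensFuel
  by_cases ht : pvTruthy corpus = true
  · simp only [ht, if_true, PySem.List.foldl_append_eq_flatten, List.nil_append]
  · rw [eq_comm]
    have ht' : pvTruthy corpus = false := by simpa using ht
    simp only [ht', Bool.false_eq_true, if_false] at hcase ⊢
    -- B side: nested folds → flatten of per-entry flattens
    have hB : tokenized.foldl
        (fun acc p => (p.2.map Prod.snd).foldl (fun acc2 toks => acc2 ++ toks) acc) [] =
        (tokenized.map (fun p => (p.2.map Prod.snd).flatten)).flatten := by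
      have hstep : tokenized.foldl
          (fun acc p => (p.2.map Prod.snd).foldl (fun acc2 toks => acc2 ++ toks) acc) [] =
          tokenized.foldl (fun acc p => acc ++ (p.2.map Prod.snd).flatten) [] := by
        apply List.foldl_ext
        intro a p _
        exact PySem.List.foldl_append_eq_flatten ..
      rw [hstep, PySem.List.foldl_append_eq_flatMap, List.nil_append, List.flatMap_def]
    -- A side: fold over keys; each key is nonempty (Pre_) so the recursive call is the truthy branch
    have hA : (tokenized.map Prod.fst).foldl
        (fun acc c => acc ++ collect_tokensFuel 1 tokenized (some c)) [] =
        (tokenized.map (fun p => (p.2.map Prod.snd).flatten)).flatten := by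
      have hkeys : ∀ c ∈ tokenized.map Prod.fst,
          collect_tokensFuel 1 tokenized (some c) =
            (((tokenized.lookup c).getD []).map Prod.snd).flatten := by
        intro c hc
        have hct : pvTruthy (some c) = true := by
          simp only [pvTruthy, decide_eq_true_eq]
          intro e; exact hcase (e ▸ hc)
        simp [collect_tokensFuel, hct, pvSub]
      rw [PySem.List.foldl_append_eq_flatMap, List.nil_append, List.flatMap_def]
      congr 1
      rw [List.map_congr_left hkeys]
      have := map_lookup_eq_map_snd tokenized hnd
        (fun o => ((o.getD []).map Prod.snd).flatten)
      simpa using this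
    simp [hB, hA]

@[simp] theorem collect_tokens_raises : Claim_raises_collect_tokens := by
  unfold Claim_raises_collect_tokens
  constructor
  · intro tokenized corpus _ hr hpre
    obtain ⟨hf, hmem⟩ := hr
    obtain ⟨_, hcase⟩ := hpre
    rw [hf, if_neg (by simp)] at hcase
    exact hcase hmem
  · exact ⟨by decide, by decide, by decide⟩
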